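-- pv_equiv track=rewrite | github.com/ethanish/AVR_UNO_TESTBED | Tutorials/P3/tests/p3_logic_test.py | run_hysteresis
-- ===== SOURCE A (Python) =====
-- def run_hysteresis(samples, low=480, recover=520):
--     active = False
--     min_adc = 1023
--     start_idx = None
--     events = []
--
--     for i, v in enumerate(samples):
--         if not active and v <= low:
--             active = True
--             min_adc = v
--             start_idx = i
--             continue
--
--         if active:
--             if v < min_adc:
--                 min_adc = v
--             if v >= recover:
--                 events.append({"start": start_idx, "end": i, "min": min_adc, "duration": i - start_idx})
--                 active = False
--                 min_adc = 1023
--                 start_idx = None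
--
--     return events, active
-- ===== SOURCE B (Python) =====
-- def run_hysteresis(samples, low=480, recover=520):
--     # Phase 1: hysteresis scan tracking only window boundaries (no running min).
--     bounds = []
--     active = False
--     start = 0
--     for i, v in enumerate(samples):
--         if not active:
--             if v <= low:
--                 active = True
--                 start = i
--         elif v >= recover:
--             bounds.append((start, i))
--             active = False
--     # Phase 2: materialise each event; min over the inclusive window slice.
--     events = [{"start": s, "end": e, "min": min(samples[s:e + 1]), "duration": e - s}
--               for (s, e) in bounds]
--     return events, active
-- ===== Notes on version B (the rewrite author's own statement) =====
-- stated objective: alternative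
-- what changed: Two-phase decomposition: the scan collects only (start,end) boundary pairs and the final active flag, then a second pass builds each event dict computing min via a per-window slice min, instead of carrying a running-min accumulator and building dicts inside the state machine.
import Mathlib
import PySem

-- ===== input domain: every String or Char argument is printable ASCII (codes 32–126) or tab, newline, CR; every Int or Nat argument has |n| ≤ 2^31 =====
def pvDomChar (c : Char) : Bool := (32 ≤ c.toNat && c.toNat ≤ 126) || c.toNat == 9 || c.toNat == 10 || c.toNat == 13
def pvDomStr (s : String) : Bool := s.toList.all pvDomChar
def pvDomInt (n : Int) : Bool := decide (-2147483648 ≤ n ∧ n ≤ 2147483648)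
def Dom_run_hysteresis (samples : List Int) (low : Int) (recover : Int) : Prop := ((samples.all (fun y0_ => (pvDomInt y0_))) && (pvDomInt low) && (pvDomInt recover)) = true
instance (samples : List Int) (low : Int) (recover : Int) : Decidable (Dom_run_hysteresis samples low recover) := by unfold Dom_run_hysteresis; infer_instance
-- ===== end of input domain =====

-- B replaces A's in-loop running-min accumulator and dict building by a boundary-only scan
-- plus a second per-window pass (objective: alternative decomposition, same cost).

-- ===== PORT A =====
-- the for-loop over enumerate(samples), state = (active, min_adc, start_idx, events);
-- start_idx.getD 0 is only read when active, where start_idx is always some (as in the Python)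
def runHystLoop (low recover : Int) : List Int → Nat → Bool → Int → Option Int →
    List (List (String × Int)) → (List (List (String × Int))) × Bool
  | [], _, active, _, _, events => (events, active)
  | v :: t, i, active, min_adc, start_idx, events =>
    if !active && v ≤ low then
      runHystLoop low recover t (i + 1) true v (some (i : Int)) events
    else if active then
      let m := if v < min_adc then v else min_adc
      if v ≥ recover then
        let s := start_idx.getD 0
        runHystLoop low recover t (i + 1) false 1023 none
          (events ++ [[("start", s), ("end", (i : Int)), ("min", m), ("duration", (i : Int) - s)]])
      else
        runHystLoop low recover t (i + 1) active m start_idx events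
    else
      runHystLoop low recover t (i + 1) active min_adc start_idx events

def run_hysteresis (samples : List Int) (low : Int) (recover : Int) : (List (List (String × Int))) × Bool :=
  runHystLoop low recover samples 0 false 1023 none []

-- ===== PORT B =====
-- phase 1: boundary-only scan
def altScan (low recover : Int) : List Int → Nat → Bool → Int → List (Int × Int) →
    (List (Int × Int)) × Bool
  | [], _, active, _, bounds => (bounds, active)
  | v :: t, i, active, start, bounds =>
    if !active then
      if v ≤ low then altScan low recover t (i + 1) true (i : Int) bounds
      else altScan low recover t (i + 1) false start bounds
    else if v ≥ recover then altScan low recover t (i + 1) false start (bounds ++ [(start, (i : Int))])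
    else altScan low recover t (i + 1) true start bounds

-- phase 2: one event dict per boundary pair; min(samples[s:e+1]) (nonempty for every produced pair)
def mkEvent (samples : List Int) (p : Int × Int) : List (String × Int) :=
  [("start", p.1), ("end", p.2),
   ("min", (PySem.List.min? (PySem.List.slice samples (some p.1) (some (p.2 + 1))) (fun y => y)).getD 0),
   ("duration", p.2 - p.1)]

def run_hysteresis_alt (samples : List Int) (low : Int) (recover : Int) : (List (List (String × Int))) × Bool :=
  let r := altScan low recover samples 0 false 0 []
  (r.1.map (mkEvent samples), r.2)

-- ===== PRECONDITION & SPEC =====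
def Spec_run_hysteresis (samples : List Int) (low : Int) (recover : Int) (out : (List (List (String × Int))) × Bool) : Prop := out = run_hysteresis_alt samples low recover
instance (samples : List Int) (low : Int) (recover : Int) (out : (List (List (String × Int))) × Bool) : Decidable (Spec_run_hysteresis samples low recover out) := by unfold Spec_run_hysteresis; infer_instance

-- ===== CLAIM (what is proved, stated in full; the proofs are below) =====
def Claim_equal_run_hysteresis : Prop := ∀ (samples : List Int) (low : Int) (recover : Int), Dom_run_hysteresis samples low recover → Spec_run_hysteresis samples low recover (run_hysteresis samples low recover)

-- ===== LEMMAS AND PROOFS =====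

-- Python's min(l + [v]) as one more fold step
theorem min?_append_singleton (l : List Int) (v : Int) :
    PySem.List.min? (l ++ [v]) (fun y => y) =
      some ((PySem.List.min? l (fun y => y)).elim v (fun m => min m v)) := by
  cases l with
  | nil =>
      have h : PySem.List.min? ([] : List Int) (fun y => y) = none := by
        simp [PySem.List.min?]
      simp [PySem.List.min?_id_cons, h]
  | cons x t =>
      simp [PySem.List.min?_id_cons, List.foldl_append]

-- the inclusive window grows by one element per step
theorem window_succ (samples : List Int) (s n : Nat) (v : Int)
    (hs : s ≤ n) (hv : samples[n]? = some v) :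
    (samples.drop s).take (n + 1 - s) = (samples.drop s).take (n - s) ++ [v] := by
  have h1 : n + 1 - s = (n - s) + 1 := by omega
  rw [h1, List.take_add_one]
  have : (samples.drop s)[n - s]? = some v := by
    rw [List.getElem?_drop]
    have : s + (n - s) = n := by omega
    rw [this, hv]
  simp [this]

theorem loop_eq (samples : List Int) (low recover : Int) :
    ∀ (rest : List Int) (n : Nat) (active : Bool) (min_adc : Int) (start_idx : Option Int)
      (startB : Int) (bs : List (Int × Int)),
      rest = samples.drop n →
      (active = true → ∃ s : Nat, start_idx = some (s : Int) ∧ startB = (s : Int) ∧ s ≤ n ∧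
        PySem.List.min? ((samples.drop s).take (n - s)) (fun y => y) = some min_adc) →
      runHystLoop low recover rest n active min_adc start_idx (bs.map (mkEvent samples)) =
        ((altScan low recover rest n active startB bs).1.map (mkEvent samples),
         (altScan low recover rest n active startB bs).2) := by
  intro rest
  induction rest with
  | nil => intro n active m si sb bs _ _; simp [runHystLoop, altScan]
  | cons v t ih =>
    intro n active m si sb bs hrest hinv
    have hv : samples[n]? = some v := by
      rw [← List.head?_drop, ← hrest]; rfl
    have ht : t = samples.drop (n + 1) := by
      rw [← List.tail_drop, ← hrest]; rfl
    cases active with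
    | false =>
      by_cases hl : v ≤ low
      · -- event starts at n
        simp only [runHystLoop, altScan, hl, Bool.not_false, decide_true, Bool.true_and,
          if_true]
        apply ih _ _ _ _ _ _ ht
        intro _
        refine ⟨n, rfl, rfl, by omega, ?_⟩
        have : (samples.drop n).take (n + 1 - n) = [v] := by
          have h1 : n + 1 - n = 1 := by omega
          rw [h1, ← hrest]; rfl
        rw [this, PySem.List.min?_id_cons]; rfl
      · simp only [runHystLoop, altScan, hl, Bool.not_false, decide_false, Bool.true_and,
          if_false, Bool.false_eq_true, if_true]
        exact ih _ _ _ _ _ _ ht (by simp)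
    | true =>
      obtain ⟨s, hsi, hsb, hsn, hmin⟩ := hinv rfl
      have hwin : (samples.drop s).take (n + 1 - s) = (samples.drop s).take (n - s) ++ [v] :=
        window_succ samples s n v hsn hv
      have hmin' : PySem.List.min? ((samples.drop s).take (n + 1 - s)) (fun y => y) =
          some (if v < m then v else m) := by
        rw [hwin, min?_append_singleton, hmin]
        simp only [Option.elim]
        congr 1
        rw [Int.min_def]
        split_ifs <;> omega
      by_cases hr : v ≥ recover
      · -- event closes at n
        simp only [runHystLoop, altScan, hr, Bool.not_true, Bool.false_and, Bool.false_eq_true,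
          if_false, if_true]
        have hev : mkEvent samples (sb, (n : Int)) =
            [("start", si.getD 0), ("end", (n : Int)), ("min", if v < m then v else m),
             ("duration", (n : Int) - si.getD 0)] := by
          simp only [mkEvent, hsi, hsb, Option.getD_some]
          have hcast : ((n : Int) + 1) = ((n + 1 : Nat) : Int) := by push_cast; ring
          rw [hcast, PySem.List.slice_natCast, hmin']
          simp
        rw [← hev]
        have : (bs.map (mkEvent samples)) ++ [mkEvent samples (sb, (n : Int))] =
            (bs ++ [(sb, (n : Int))]).map (mkEvent samples) := by simp
        rw [this]
        exact ih _ _ _ _ _ _ ht (by simp)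
      · simp only [runHystLoop, altScan, hr, Bool.not_true, Bool.false_and, Bool.false_eq_true,
          if_false, if_true]
        apply ih _ _ _ _ _ _ ht
        intro _
        exact ⟨s, hsi, hsb, by omega, hmin'⟩

-- ===== VERDICT (by name: the statement is the Claim_ definition above) =====
theorem run_hysteresis_spec : Claim_equal_run_hysteresis := by
  intro samples low recover _
  unfold Spec_run_hysteresis run_hysteresis run_hysteresis_alt
  have := loop_eq samples low recover samples 0 false 1023 none 0 []
    (by simp) (by simp)
  simpa using this
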